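/- GENERATED by c/gen_decode.py: every decode fact of the image. -/
import Vorbis.Dec.D000
import Vorbis.Dec.D001
import Vorbis.Dec.D002
import Vorbis.Dec.D003
import Vorbis.Dec.D004
import Vorbis.Dec.D005
import Vorbis.Dec.D006
import Vorbis.Dec.D007
import Vorbis.Dec.D008
import Vorbis.Dec.D009
import Vorbis.Dec.D010
import Vorbis.Dec.D011
import Vorbis.Dec.D012
import Vorbis.Dec.D013
import Vorbis.Dec.D014
import Vorbis.Dec.D015
import Vorbis.Dec.D016
import Vorbis.Dec.D017
import Vorbis.Dec.D018
import Vorbis.Dec.D019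
import Vorbis.Dec.D020
import Vorbis.Dec.D021
import Vorbis.Dec.D022
import Vorbis.Dec.D023
import Vorbis.Dec.D024
import Vorbis.Dec.D025
import Vorbis.Dec.D026
import Vorbis.Dec.D027
import Vorbis.Dec.D028
import Vorbis.Dec.D029
import Vorbis.Dec.D030
import Vorbis.Dec.D031
import Vorbis.Dec.D032
import Vorbis.Dec.D033
import Vorbis.Dec.D034
import Vorbis.Dec.D035
import Vorbis.Dec.D036
import Vorbis.Dec.D037
import Vorbis.Dec.D038
import Vorbis.Dec.D039
import Vorbis.Dec.D040
import Vorbis.Dec.D041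
import Vorbis.Dec.D042
import Vorbis.Dec.D043
import Vorbis.Dec.D044
import Vorbis.Dec.D045
import Vorbis.Dec.D046
import Vorbis.Dec.D047
import Vorbis.Dec.D048
import Vorbis.Dec.D049
import Vorbis.Dec.D050
import Vorbis.Dec.D051
import Vorbis.Dec.D052
import Vorbis.Dec.D053
import Vorbis.Dec.D054
import Vorbis.Dec.D055
import Vorbis.Dec.D056
import Vorbis.Dec.D057
import Vorbis.Dec.D058
import Vorbis.Dec.D059
import Vorbis.Dec.D060
import Vorbis.Dec.D061
import Vorbis.Dec.D062
import Vorbis.Dec.D063
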